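-- pv_equiv track=rewrite | github.com/Tanushree713/BasicsInPython | testing.py | spaceOptimize
-- ===== SOURCE A (Python) =====
-- def spaceOptimize( a, b ):
--     marked  = 0
--     for num in range(a , b + 1) :
--         if num % 2 == 0 or num % 5 == 0 :
--             marked |= (1 << (num - a))
--     multiples = []
--     for i in range(b - a + 1):
--         if (marked & (1 << i)) != 0:
--             multiples.append(a + i)
--     return multiples
-- ===== SOURCE B (Python) =====
-- def spaceOptimize(a, b):
--     return [num for num in range(a, b + 1) if num % 2 == 0 or num % 5 == 0]
-- ===== Notes on version B (the rewrite author's own statement) =====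
-- stated objective: simpler
-- what changed: Replaced A's two passes (build an integer bitmask of qualifying offsets, then decode each bit back into a number) with a single list comprehension that filters range(a, b+1) directly.
import Mathlib
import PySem

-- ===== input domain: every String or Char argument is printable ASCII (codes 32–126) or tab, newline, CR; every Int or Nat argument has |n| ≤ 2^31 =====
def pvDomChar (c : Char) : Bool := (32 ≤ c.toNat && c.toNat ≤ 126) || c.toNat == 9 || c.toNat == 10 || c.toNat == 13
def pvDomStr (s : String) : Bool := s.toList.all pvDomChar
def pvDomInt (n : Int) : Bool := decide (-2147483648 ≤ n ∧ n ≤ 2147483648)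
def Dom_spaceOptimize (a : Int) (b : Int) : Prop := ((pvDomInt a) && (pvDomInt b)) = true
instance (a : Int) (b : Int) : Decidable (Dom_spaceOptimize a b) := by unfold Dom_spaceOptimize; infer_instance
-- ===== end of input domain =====

-- B replaces A's bitmask build-then-decode (two loops) by one direct filtering pass; objective: simpler.

-- ===== PORT A =====
-- The mask is kept as a Nat: every value ORed in is 1 <<< (num - a) with num ≥ a inside
-- range(a, b+1), and i ≥ 0 inside range(b - a + 1), so Python's nonnegative big int is
-- modelled exactly; .toNat is applied only to these provably nonnegative shift amounts.
def spaceOptimize (a : Int) (b : Int) : List Int :=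
  let marked : Nat :=
    (PySem.List.pyRange a (b + 1) 1).foldl
      (fun m num =>
        if PySem.Int.mod num 2 = 0 ∨ PySem.Int.mod num 5 = 0 then
          m ||| (1 <<< (num - a).toNat)
        else m) 0
  (PySem.List.pyRange 0 (b - a + 1) 1).foldl
    (fun acc i => if marked &&& (1 <<< i.toNat) ≠ 0 then acc ++ [a + i] else acc) []

-- ===== PORT B =====
def spaceOptimize_alt (a : Int) (b : Int) : List Int :=
  (PySem.List.pyRange a (b + 1) 1).filter
    (fun num => decide (PySem.Int.mod num 2 = 0 ∨ PySem.Int.mod num 5 = 0))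

-- ===== PRECONDITION & SPEC =====
def Spec_spaceOptimize (a : Int) (b : Int) (out : List Int) : Prop := out = spaceOptimize_alt a b
instance (a : Int) (b : Int) (out : List Int) : Decidable (Spec_spaceOptimize a b out) := by unfold Spec_spaceOptimize; infer_instance

-- ===== CLAIM (what is proved, stated in full; the proofs are below) =====
def Claim_equal_spaceOptimize : Prop := ∀ (a : Int) (b : Int), Dom_spaceOptimize a b → Spec_spaceOptimize a b (spaceOptimize a b)

-- ===== LEMMAS AND PROOFS =====

-- the Bool test shared by both characterisations
def pvQ (num : Int) : Bool := decide (PySem.Int.mod num 2 = 0 ∨ PySem.Int.mod num 5 = 0)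

-- bit j of the mask built over range n is set iff j < n and position a + j qualifies
theorem pv_mask_testBit (a : Int) (n : ℕ) (j : ℕ) :
    ((List.range n).foldl
        (fun (m : Nat) (k : ℕ) => if pvQ (a + (k : Int)) then m ||| (1 <<< k) else m) 0).testBit j
      = (decide (j < n) && pvQ (a + (j : Int))) := by
  induction n with
  | zero => simp
  | succ n ih =>
    rw [List.range_succ, List.foldl_append]
    simp only [List.foldl_cons, List.foldl_nil]
    split_ifs with h
    · rw [Nat.testBit_or, ih, Nat.one_shiftLeft, Nat.testBit_two_pow]
      by_cases hj : j = n
      · subst hj; simp [h]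
      · have hle : (j < n) ↔ (j ≤ n) := by omega
        simp [Ne.symm hj, hle]
    · rw [ih]
      by_cases hj : j = n
      · subst hj; simp [h]
      · have hle : (j < n) ↔ (j ≤ n) := by omega
        simp [hle]

theorem pv_and_pow_ne (x : Nat) (i : Nat) :
    (x &&& (1 <<< i) ≠ 0) ↔ x.testBit i = true := by
  rw [Nat.one_shiftLeft, Nat.and_two_pow]
  cases h : x.testBit i <;> simp

theorem spaceOptimize_eq_alt (a b : Int) : spaceOptimize a b = spaceOptimize_alt a b := by
  unfold spaceOptimize spaceOptimize_alt
  have hlen : (b + 1 - a) = (b - a + 1) := by ring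
  rw [PySem.List.pyRange_one a (b + 1), PySem.List.pyRange_one 0 (b - a + 1)]
  simp only [List.foldl_map, zero_add, Int.sub_zero, hlen]
  -- the first loop builds exactly the mask of pv_mask_testBit
  have hq : ∀ (m : Nat) (k : ℕ),
      (if PySem.Int.mod (a + (k : Int)) 2 = 0 ∨ PySem.Int.mod (a + (k : Int)) 5 = 0 then
          m ||| (1 <<< ((a + (k : Int)) - a).toNat) else m)
        = (if pvQ (a + (k : Int)) then m ||| (1 <<< k) else m) := by
    intro m k
    have h1 : ((a + (k : Int)) - a).toNat = k := by omega
    rw [h1]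
    by_cases h : PySem.Int.mod (a + (k : Int)) 2 = 0 ∨ PySem.Int.mod (a + (k : Int)) 5 = 0 <;>
      simp [pvQ, h]
  simp only [hq]
  set n := (b - a + 1).toNat with hn
  set marked := ((List.range n).foldl
      (fun (m : Nat) (k : ℕ) => if pvQ (a + (k : Int)) then m ||| (1 <<< k) else m) 0) with hm
  -- the second loop appends a + k exactly when bit k of the mask is set
  rw [PySem.List.foldl_append_ite (p := fun k : ℕ => marked &&& (1 <<< ((k : Int)).toNat) ≠ 0)
      (f := fun k : ℕ => a + (k : Int))]
  rw [List.filter_map]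
  simp only [List.nil_append]
  congr 1
  apply List.filter_congr
  intro k hk
  rw [List.mem_range] at hk
  simp only [Function.comp_apply, Int.toNat_natCast]
  simp only [decide_eq_decide]
  rw [pv_and_pow_ne, hm, pv_mask_testBit]
  simp [pvQ, hk]

-- ===== VERDICT (by name: the statement is the Claim_ definition above) =====
theorem spaceOptimize_spec : Claim_equal_spaceOptimize := by
  intro a b _
  unfold Spec_spaceOptimize
  exact spaceOptimize_eq_alt a b
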